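-- pv_equiv track=rewrite | github.com/prathameshrodi/Algorithms | Simple Questions/total_strength.py | totalStrength_2
-- ===== SOURCE A (Python) =====
-- from itertools import accumulate
--
-- def totalStrength_2(A):
--     mod = 10 ** 9 + 7
--     n = len(A)
--
--     right = [n] * n
--     left = [-1] * n
--     st = []
--     for i in range(n):
--         if st:
--             a_st = A[st[-1]]
--             a_i = A[i]
--         while st and A[st[-1]] >= A[i]:
--             right[st.pop()] = i
--         if st:
--             left[i] = st[-1]
--         st.append(i)
--
--     res = 0
--     acc = list(accumulate(accumulate(A), initial=0))
--     for i in range(n):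
--         l, r = left[i], right[i]
--         lacc = acc[i] - acc[max(l, 0)]
--         racc = acc[r] - acc[i]
--         ln, rn = i - l, r - i
--         res += A[i] * (racc * ln - lacc * rn) % mod
--     return res % mod
-- ===== SOURCE B (Python) =====
-- def totalStrength_2(A):
--     mod = 10 ** 9 + 7
--     n = len(A)
--     P = []
--     s = 0
--     for x in A:
--         s += x
--         P.append(s)
--     res = 0
--     for i in range(n):
--         ai = A[i]
--         l = i - 1
--         while l >= 0 and A[l] >= ai:
--             l -= 1
--         r = i + 1
--         while r < n and A[r] > ai:
--             r += 1
--         lacc = sum(P[max(l, 0):i])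
--         racc = sum(P[i:r])
--         res += ai * ((racc * (i - l) - lacc * (r - i)) % mod)
--     return res % mod
-- ===== Notes on version B (the rewrite author's own statement) =====
-- stated objective: simpler
-- what changed: Replaced the monotonic-stack boundary computation and the double-accumulate prefix array with direct per-index scans (previous strictly-smaller / next smaller-or-equal) plus a single prefix-sum list whose slices give the same contribution formula.
import Mathlib
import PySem

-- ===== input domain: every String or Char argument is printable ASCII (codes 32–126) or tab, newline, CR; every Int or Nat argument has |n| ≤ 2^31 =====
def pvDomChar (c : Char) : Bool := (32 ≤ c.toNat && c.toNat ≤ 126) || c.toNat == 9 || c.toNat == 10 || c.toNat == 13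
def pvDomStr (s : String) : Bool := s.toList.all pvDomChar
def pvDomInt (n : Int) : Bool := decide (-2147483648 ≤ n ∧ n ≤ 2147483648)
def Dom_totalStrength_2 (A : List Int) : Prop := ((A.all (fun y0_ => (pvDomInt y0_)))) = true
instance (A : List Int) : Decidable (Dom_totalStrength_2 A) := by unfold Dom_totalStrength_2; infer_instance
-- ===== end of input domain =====

-- B replaces A's monotonic stack and double-accumulate array by direct per-index scans and
-- prefix-sum slices (simpler, not faster); both return the same value on every input.

-- ===== PORT A =====
-- itertools.accumulate (running sums, with running start s)
def pvAccumA : List Int → Int → List Int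
  | [], _ => []
  | x :: xs, s => (s + x) :: pvAccumA xs (s + x)

-- 'while st and A[st[-1]] >= A[i]: right[st.pop()] = i' ; stack held top-first
def pvPopWhile (A : List Int) (i : Nat) : List Nat → List Int → List Nat × List Int
  | [], right => ([], right)
  | p :: rest, right =>
    if A.getD p 0 ≥ A.getD i 0 then pvPopWhile A i rest (right.set p (i : Int))
    else (p :: rest, right)

-- 'for i in range(n): …' of A's first loop (the unused reads a_st/a_i are side-effect-free and omitted)
def pvStackLoop (A : List Int) (n : Nat) (i : Nat) (st : List Nat) (right left : List Int) :
    List Int × List Int :=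
  if h : i < n then
    let pr := pvPopWhile A i st right
    let left' := match pr.1 with
      | [] => left
      | t :: _ => left.set i ((t : Nat) : Int)
    pvStackLoop A n (i + 1) (i :: pr.1) pr.2 left'
  else (right, left)
  termination_by n - i

def totalStrength_2 (A : List Int) : Int :=
  let md : Int := 10 ^ 9 + 7
  let n := A.length
  let rl := pvStackLoop A n 0 [] (List.replicate n (n : Int)) (List.replicate n (-1 : Int))
  -- acc = list(accumulate(accumulate(A), initial=0))
  let acc : List Int := 0 :: pvAccumA (pvAccumA A 0) 0
  let res := (List.range n).foldl (fun res i =>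
    let l := rl.2.getD i 0
    let r := rl.1.getD i 0
    let lacc := acc.getD i 0 - acc.getD (max l 0).toNat 0
    let racc := acc.getD r.toNat 0 - acc.getD i 0
    let ln := (i : Int) - l
    let rn := r - (i : Int)
    res + A.getD i 0 * (PySem.Int.mod (racc * ln - lacc * rn) md)) 0
  PySem.Int.mod res md

-- ===== PORT B =====
-- 'P = []; s = 0; for x in A: s += x; P.append(s)'
def pvPrefixB : List Int → Int → List Int
  | [], _ => []
  | x :: xs, s => (s + x) :: pvPrefixB xs (s + x)

-- 'l = i - 1; while l >= 0 and A[l] >= ai: l -= 1'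
def pvPrevSmaller (A : List Int) (ai : Int) (l : Int) : Int :=
  if 0 ≤ l ∧ A.getD l.toNat 0 ≥ ai then pvPrevSmaller A ai (l - 1) else l
  termination_by (l + 1).toNat
  decreasing_by omega

-- 'r = i + 1; while r < n and A[r] > ai: r += 1'
def pvNextSmallEq (A : List Int) (n : Nat) (ai : Int) (r : Nat) : Nat :=
  if h : r < n ∧ A.getD r 0 > ai then pvNextSmallEq A n ai (r + 1) else r
  termination_by n - r

def totalStrength_2_alt (A : List Int) : Int :=
  let md : Int := 10 ^ 9 + 7
  let n := A.length
  let P := pvPrefixB A 0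
  let res := (List.range n).foldl (fun res i =>
    let ai := A.getD i 0
    let l := pvPrevSmaller A ai ((i : Int) - 1)
    let r := pvNextSmallEq A n ai (i + 1)
    let lacc := (PySem.List.slice P (some (max l 0)) (some (i : Int))).sum
    let racc := (PySem.List.slice P (some (i : Int)) (some (r : Int))).sum
    res + ai * (PySem.Int.mod (racc * ((i : Int) - l) - lacc * ((r : Int) - (i : Int))) md)) 0
  PySem.Int.mod res md

-- ===== PRECONDITION & SPEC =====
def Spec_totalStrength_2 (A : List Int) (out : Int) : Prop := out = totalStrength_2_alt A
instance (A : List Int) (out : Int) : Decidable (Spec_totalStrength_2 A out) := by unfold Spec_totalStrength_2; infer_instance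

-- ===== CLAIM (what is proved, stated in full; the proofs are below) =====
def Claim_equal_totalStrength_2 : Prop := ∀ (A : List Int), Dom_totalStrength_2 A → Spec_totalStrength_2 A (totalStrength_2 A)

-- ===== LEMMAS AND PROOFS =====

-- specification helpers for A's stack loop
def pvNsp (A : List Int) (n p : Nat) : Nat := pvNextSmallEq A n (A.getD p 0) (p + 1)
def pvPsp (A : List Int) (p : Nat) : Int := pvPrevSmaller A (A.getD p 0) ((p : Int) - 1)

def pvBuildStack (A : List Int) : Nat → List Nat
  | 0 => []
  | i + 1 => i :: (pvBuildStack A i).filter (fun j => !decide (A.getD j 0 ≥ A.getD i 0))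

def pvRightAt (A : List Int) (n i : Nat) : List Int :=
  (List.range n).map (fun p => if pvNsp A n p < i then ((pvNsp A n p : Nat) : Int) else (n : Int))

def pvLeftAt (A : List Int) (n i : Nat) : List Int :=
  (List.range n).map (fun p => if p < i then pvPsp A p else -1)

theorem mem_pvBuildStack (A : List Int) (i : Nat) (j : Nat) :
    j ∈ pvBuildStack A i ↔ j < i ∧ ∀ k, j < k → k < i → A.getD j 0 < A.getD k 0 := by
  induction i with
  | zero => simp [pvBuildStack]
  | succ i ih =>
    simp only [pvBuildStack, List.mem_cons, List.mem_filter, ih, Bool.not_eq_eq_eq_not,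
      Bool.not_true, decide_eq_false_iff_not, not_le]
    constructor
    · rintro (rfl | ⟨⟨hj, hall⟩, hlt⟩)
      · exact ⟨by omega, fun k hk1 hk2 => by omega⟩
      · refine ⟨by omega, fun k h1 h2 => ?_⟩
        rcases Nat.lt_succ_iff_lt_or_eq.mp h2 with h | rfl
        exacts [hall k h1 h, hlt]
    · rintro ⟨hj, hall⟩
      rcases Nat.lt_succ_iff_lt_or_eq.mp hj with h | rfl
      · exact Or.inr ⟨⟨h, fun k h1 h2 => hall k h1 (by omega)⟩, hall i h (by omega)⟩
      · exact Or.inl rfl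

theorem pvBuildStack_pairwise (A : List Int) (i : Nat) :
    (pvBuildStack A i).Pairwise (fun x y => y < x) := by
  induction i with
  | zero => simp [pvBuildStack]
  | succ i ih =>
    refine List.pairwise_cons.mpr ⟨fun j hj => ?_, ih.filter _⟩
    exact ((mem_pvBuildStack A i j).mp (List.mem_filter.mp hj).1).1

theorem pvBuildStack_val_lt (A : List Int) (i : Nat) {j' j : Nat}
    (h1 : j' ∈ pvBuildStack A i) (h2 : j ∈ pvBuildStack A i) (h : j' < j) :
    A.getD j' 0 < A.getD j 0 := by
  exact ((mem_pvBuildStack A i j').mp h1).2 j h ((mem_pvBuildStack A i j).mp h2).1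

-- nextSmallEq characterisation
theorem ns_ge (A : List Int) (n : Nat) (ai : Int) (r : Nat) : r ≤ pvNextSmallEq A n ai r := by
  rw [pvNextSmallEq]
  split
  · have := ns_ge A n ai (r + 1); omega
  · omega
termination_by n - r
decreasing_by omega

theorem ns_le (A : List Int) (n : Nat) (ai : Int) (r : Nat) (h : r ≤ n) :
    pvNextSmallEq A n ai r ≤ n := by
  rw [pvNextSmallEq]
  split
  · exact ns_le A n ai (r + 1) (by omega)
  · omega
termination_by n - r
decreasing_by omega

theorem ns_stop (A : List Int) (n : Nat) (ai : Int) (r : Nat) :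
    ¬ (pvNextSmallEq A n ai r < n ∧ A.getD (pvNextSmallEq A n ai r) 0 > ai) := by
  rw [pvNextSmallEq]
  split
  · exact ns_stop A n ai (r + 1)
  · assumption
termination_by n - r
decreasing_by omega

theorem ns_scan (A : List Int) (n : Nat) (ai : Int) (r : Nat) :
    ∀ k, r ≤ k → k < pvNextSmallEq A n ai r → k < n ∧ A.getD k 0 > ai := by
  intro k hk1 hk2
  rw [pvNextSmallEq] at hk2
  revert hk2
  split
  · intro hk2
    rcases Nat.eq_or_lt_of_le hk1 with rfl | h
    · assumption
    · exact ns_scan A n ai (r + 1) k (by omega) hk2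
  · intro hk2; omega
termination_by n - r
decreasing_by omega

theorem ns_eq_of (A : List Int) (n : Nat) (ai : Int) (r m : Nat) (hrm : r ≤ m)
    (hscan : ∀ k, r ≤ k → k < m → k < n ∧ A.getD k 0 > ai)
    (hstop : ¬ (m < n ∧ A.getD m 0 > ai)) :
    pvNextSmallEq A n ai r = m := by
  rw [pvNextSmallEq]
  split
  · rename_i hc
    rcases Nat.eq_or_lt_of_le hrm with rfl | h
    · exact absurd hc hstop
    · exact ns_eq_of A n ai (r + 1) m (by omega) (fun k h1 h2 => hscan k (by omega) h2) hstop
  · rename_i hc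
    rcases Nat.eq_or_lt_of_le hrm with rfl | h
    · rfl
    · exact absurd (hscan r (le_refl r) h) hc
termination_by n - r
decreasing_by omega

-- prevSmaller characterisation
theorem ps_le (A : List Int) (ai : Int) (l : Int) : pvPrevSmaller A ai l ≤ l := by
  rw [pvPrevSmaller]
  split
  · have := ps_le A ai (l - 1); omega
  · omega
termination_by (l + 1).toNat
decreasing_by omega

theorem ps_eq (A : List Int) (ai : Int) (l t : Int) (htl : t ≤ l)
    (ht : t = -1 ∨ (0 ≤ t ∧ A.getD t.toNat 0 < ai))
    (hscan : ∀ j : Nat, t < (j : Int) → (j : Int) ≤ l → ai ≤ A.getD j 0) :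
    pvPrevSmaller A ai l = t := by
  rw [pvPrevSmaller]
  split
  · rename_i hc
    have htl' : t < l := by
      rcases ht with rfl | ⟨ht0, htv⟩
      · omega
      · rcases eq_or_lt_of_le htl with rfl | h
        · exact absurd hc.2 (not_le.mpr htv)
        · exact h
    exact ps_eq A ai (l - 1) t (by omega) ht
      (fun j h1 h2 => hscan j h1 (by omega))
  · rename_i hc
    rcases eq_or_lt_of_le htl with rfl | h
    · rfl
    · exfalso
      have hl0 : 0 ≤ l := by rcases ht with rfl | ⟨ht0, _⟩ <;> omega
      have hcast : ((l.toNat : Nat) : Int) = l := Int.toNat_of_nonneg hl0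
      have := hscan l.toNat (by omega) (by omega)
      exact hc ⟨hl0, by omega⟩
termination_by (l + 1).toNat
decreasing_by omega

theorem popped_ns (A : List Int) {n i p : Nat} (hin : i < n)
    (hp : p ∈ pvBuildStack A i) (hv : A.getD i 0 ≤ A.getD p 0) :
    pvNsp A n p = i := by
  obtain ⟨hpi, hall⟩ := (mem_pvBuildStack A i p).mp hp
  exact ns_eq_of A n _ (p + 1) i (by omega)
    (fun k h1 h2 => ⟨by omega, hall k (by omega) h2⟩)
    (fun h => absurd hv (not_le.mpr h.2))

theorem ns_eq_imp (A : List Int) {n i q : Nat} (hin : i < n) (h : pvNsp A n q = i) :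
    q ∈ pvBuildStack A i ∧ A.getD i 0 ≤ A.getD q 0 := by
  have hge := ns_ge A n (A.getD q 0) (q + 1)
  rw [pvNsp] at h
  rw [h] at hge
  refine ⟨(mem_pvBuildStack A i q).mpr ⟨by omega, fun k hk1 hk2 => ?_⟩, ?_⟩
  · exact (ns_scan A n (A.getD q 0) (q + 1) k (by omega) (by omega)).2
  · have := ns_stop A n (A.getD q 0) (q + 1)
    rw [h] at this
    by_contra hlt
    exact this ⟨hin, by omega⟩

theorem chain_ge (A : List Int) (i : Nat) (t : Int)
    (h : ∀ j ∈ pvBuildStack A i, t < (j : Int) → A.getD i 0 ≤ A.getD j 0)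
    (j : Nat) (h1 : t < (j : Int)) (h2 : j < i) : A.getD i 0 ≤ A.getD j 0 := by
  by_cases hm : j ∈ pvBuildStack A i
  · exact h j hm h1
  · rw [mem_pvBuildStack] at hm
    push_neg at hm
    obtain ⟨k, hk1, hk2, hk3⟩ := hm h2
    have hik := chain_ge A i t h k (by omega) hk2
    omega
termination_by i - j
decreasing_by omega

theorem popWhile_spec (A : List Int) (i : Nat) (st : List Nat) (R : List Int)
    (hmem : ∀ j ∈ st, j ∈ pvBuildStack A i) (hpw : st.Pairwise (fun x y => y < x)) :
    pvPopWhile A i st R =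
      (st.filter (fun j => !decide (A.getD j 0 ≥ A.getD i 0)),
       (st.filter (fun j => decide (A.getD j 0 ≥ A.getD i 0))).foldl
         (fun r p => r.set p (i : Int)) R) := by
  induction st generalizing R with
  | nil => simp [pvPopWhile]
  | cons p rest ih =>
    rw [pvPopWhile]
    by_cases hc : A.getD p 0 ≥ A.getD i 0
    · rw [if_pos hc,
        ih (R.set p (i : Int)) (fun j hj => hmem j (List.mem_cons_of_mem p hj))
          (List.pairwise_cons.mp hpw).2]
      have hfc1 : (p :: rest).filter (fun j => !decide (A.getD j 0 ≥ A.getD i 0))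
          = rest.filter (fun j => !decide (A.getD j 0 ≥ A.getD i 0)) := by
        rw [List.filter_cons, decide_eq_true hc]; simp
      have hfc2 : (p :: rest).filter (fun j => decide (A.getD j 0 ≥ A.getD i 0))
          = p :: rest.filter (fun j => decide (A.getD j 0 ≥ A.getD i 0)) := by
        rw [List.filter_cons, decide_eq_true hc]; simp
      rw [hfc1, hfc2, List.foldl_cons]
    · rw [if_neg hc]
      have hall : ∀ j ∈ rest, ¬ (A.getD j 0 ≥ A.getD i 0) := by
        intro j hj
        have hjp : j < p := (List.pairwise_cons.mp hpw).1 j hj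
        have := pvBuildStack_val_lt A i (hmem j (List.mem_cons_of_mem p hj))
          (hmem p List.mem_cons_self) hjp
        omega
      have h1 : (p :: rest).filter (fun j => !decide (A.getD j 0 ≥ A.getD i 0)) = p :: rest := by
        apply List.filter_eq_self.mpr
        intro j hj
        rcases List.mem_cons.mp hj with rfl | hj'
        · simpa using hc
        · simpa using hall j hj'
      have h2 : (p :: rest).filter (fun j => decide (A.getD j 0 ≥ A.getD i 0)) = [] := by
        apply List.filter_eq_nil_iff.mpr
        intro j hj
        rcases List.mem_cons.mp hj with rfl | hj'
        · simpa using hc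
        · simpa using hall j hj' 
      rw [h1, h2]
      simp

theorem foldl_set_getElem? (v : Int) (L : List Nat) (R : List Int)
    (hL : ∀ p ∈ L, p < R.length) (q : Nat) :
    (L.foldl (fun r p => r.set p v) R)[q]? = if q ∈ L then some v else R[q]? := by
  induction L generalizing R with
  | nil => simp
  | cons p L' ih =>
    rw [List.foldl_cons, ih (R.set p v)
      (fun x hx => by simpa using hL x (List.mem_cons_of_mem p hx))]
    by_cases hq : q ∈ L'
    · simp [hq]
    · by_cases hqp : q = p
      · subst hqp
        simp [hq, List.getElem?_set_self', hL q List.mem_cons_self]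
      · simp [hq, hqp, List.getElem?_set_ne (fun h => hqp h.symm)]

theorem right_step (A : List Int) {n i : Nat} (hi : i < n) :
    ((pvBuildStack A i).filter (fun j => decide (A.getD j 0 ≥ A.getD i 0))).foldl
        (fun r p => r.set p (i : Int)) (pvRightAt A n i) = pvRightAt A n (i + 1) := by
  have hsub : ∀ p ∈ (pvBuildStack A i).filter (fun j => decide (A.getD j 0 ≥ A.getD i 0)),
      p < (pvRightAt A n i).length := by
    intro p hp
    have := ((mem_pvBuildStack A i p).mp (List.mem_filter.mp hp).1).1
    simp only [pvRightAt, List.length_map, List.length_range]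
    omega
  apply List.ext_getElem?
  intro q
  rw [foldl_set_getElem? _ _ _ hsub q]
  by_cases hqn : q < n
  · by_cases hqf : q ∈ (pvBuildStack A i).filter (fun j => decide (A.getD j 0 ≥ A.getD i 0))
    · obtain ⟨hqs, hqv⟩ := List.mem_filter.mp hqf
      have hns : pvNsp A n q = i := popped_ns A hi hqs (by simpa using hqv)
      rw [if_pos hqf]
      simp [pvRightAt, List.getElem?_range, hqn, hns]
    · rw [if_neg hqf]
      have hne : pvNsp A n q ≠ i := by
        intro he
        obtain ⟨hmem', hval⟩ := ns_eq_imp A hi he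
        exact hqf (List.mem_filter.mpr ⟨hmem', decide_eq_true (by simpa using hval)⟩)
      simp only [pvRightAt, List.getElem?_map, List.getElem?_range, hqn, if_pos,
        Option.map_some]
      by_cases hlt : pvNsp A n q < i
      · rw [if_pos hlt, if_pos (by omega)]
      · rw [if_neg hlt, if_neg (by omega)]
  · have hnf : q ∉ (pvBuildStack A i).filter (fun j => decide (A.getD j 0 ≥ A.getD i 0)) := by
      intro h
      have := ((mem_pvBuildStack A i q).mp (List.mem_filter.mp h).1).1
      omega
    rw [if_neg hnf]
    simp [pvRightAt, List.getElem?_range, hqn]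

theorem left_step_nil (A : List Int) {n i : Nat} (hi : i < n)
    (hfe : (pvBuildStack A i).filter (fun j => !decide (A.getD j 0 ≥ A.getD i 0)) = []) :
    pvLeftAt A n i = pvLeftAt A n (i + 1) := by
  have hall : ∀ j ∈ pvBuildStack A i, A.getD i 0 ≤ A.getD j 0 := by
    intro j hj
    have := List.filter_eq_nil_iff.mp hfe j hj
    simpa using this
  have hps : pvPsp A i = -1 := by
    apply ps_eq
    · omega
    · exact Or.inl rfl
    · intro j hj1 hj2
      exact chain_ge A i (-1) (fun j hj _ => hall j hj) j hj1 (by omega)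
  unfold pvLeftAt
  apply List.map_congr_left
  intro p hp
  by_cases hpi : p = i
  · subst hpi
    simp [hps]
  · by_cases hpl : p < i
    · rw [if_pos hpl, if_pos (by omega)]
    · rw [if_neg hpl, if_neg (by omega)]

theorem left_step_cons (A : List Int) {n i : Nat} (t : Nat) (rest : List Nat) (hi : i < n)
    (hfe : (pvBuildStack A i).filter (fun j => !decide (A.getD j 0 ≥ A.getD i 0)) = t :: rest) :
    (pvLeftAt A n i).set i ((t : Nat) : Int) = pvLeftAt A n (i + 1) := by
  have htf : t ∈ (pvBuildStack A i).filter (fun j => !decide (A.getD j 0 ≥ A.getD i 0)) := by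
    rw [hfe]; exact List.mem_cons_self
  obtain ⟨htm, htv⟩ := List.mem_filter.mp htf
  have hti : t < i := ((mem_pvBuildStack A i t).mp htm).1
  have htval : A.getD t 0 < A.getD i 0 := by simpa using htv
  have hpwf : (t :: rest).Pairwise (fun x y => y < x) :=
    hfe ▸ (pvBuildStack_pairwise A i).filter _
  have hgt : ∀ j ∈ pvBuildStack A i, (t : Int) < (j : Int) → A.getD i 0 ≤ A.getD j 0 := by
    intro j hj hlt
    by_contra hno
    push_neg at hno
    have hjf : j ∈ (pvBuildStack A i).filter (fun j => !decide (A.getD j 0 ≥ A.getD i 0)) :=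
      List.mem_filter.mpr ⟨hj, by simpa using hno⟩
    rw [hfe] at hjf
    rcases List.mem_cons.mp hjf with rfl | hjr
    · omega
    · have := (List.pairwise_cons.mp hpwf).1 j hjr
      omega
  have hps : pvPsp A i = ((t : Nat) : Int) := by
    apply ps_eq
    · omega
    · refine Or.inr ⟨by omega, ?_⟩
      simpa using htval
    · intro j hj1 hj2
      exact chain_ge A i ((t : Nat) : Int) hgt j hj1 (by omega)
  have hlen : i < (pvLeftAt A n i).length := by
    simp only [pvLeftAt, List.length_map, List.length_range]; omega
  apply List.ext_getElem?
  intro q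
  by_cases hqi : q = i
  · subst hqi
    have h1 : q < q + 1 := by omega
    simp [pvLeftAt, hi, hps, h1, List.getElem?_set_self', hlen]
  · rw [List.getElem?_set_ne (fun h => hqi h.symm)]
    by_cases hqn : q < n
    · simp only [pvLeftAt, List.getElem?_map, List.getElem?_range hqn, Option.map_some]
      by_cases hql : q < i
      · rw [if_pos hql, if_pos (by omega)]
      · rw [if_neg hql, if_neg (by omega)]
    · have h3 : (List.range n)[q]? = none := by
        rw [List.getElem?_eq_none_iff]
        simpa using hqn
      simp only [pvLeftAt, List.getElem?_map, h3, Option.map_none]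

theorem loop_inv (A : List Int) (n : Nat) (d i : Nat) (hd : n - i = d) (hi : i ≤ n) :
    pvStackLoop A n i (pvBuildStack A i) (pvRightAt A n i) (pvLeftAt A n i) =
      (pvRightAt A n n, pvLeftAt A n n) := by
  induction d generalizing i with
  | zero =>
    have hin : i = n := by omega
    subst hin
    rw [pvStackLoop, dif_neg (by omega)]
  | succ d ih =>
    have hin : i < n := by omega
    rw [pvStackLoop, dif_pos hin]
    simp only [popWhile_spec A i _ _ (fun j hj => hj) (pvBuildStack_pairwise A i)]
    cases hfe : (pvBuildStack A i).filter (fun j => !decide (A.getD j 0 ≥ A.getD i 0)) with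
    | nil =>
      rw [right_step A hin]
      have hbs : pvBuildStack A (i + 1) = i :: ([] : List Nat) := by rw [pvBuildStack, hfe]
      have h := ih (i + 1) (by omega) (by omega)
      rw [hbs, ← left_step_nil A hin hfe] at h
      exact h
    | cons t rest =>
      rw [right_step A hin]
      have hbs : pvBuildStack A (i + 1) = i :: t :: rest := by rw [pvBuildStack, hfe]
      have h := ih (i + 1) (by omega) (by omega)
      rw [hbs, ← left_step_cons A t rest hin hfe] at h
      exact h

theorem stack_result (A : List Int) (n : Nat) :
    pvStackLoop A n 0 [] (List.replicate n (n : Int)) (List.replicate n (-1 : Int)) =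
      (pvRightAt A n n, pvLeftAt A n n) := by
  have hr : pvRightAt A n 0 = List.replicate n (n : Int) := by
    unfold pvRightAt
    rw [List.map_congr_left (g := fun _ => (n : Int)) (fun p _ => if_neg (by omega))]
    rw [List.map_const', List.length_range]
  have hl : pvLeftAt A n 0 = List.replicate n (-1 : Int) := by
    unfold pvLeftAt
    rw [List.map_congr_left (g := fun _ => (-1 : Int)) (fun p _ => if_neg (by omega))]
    rw [List.map_const', List.length_range]
  have h := loop_inv A n n 0 (by omega) (by omega)
  rw [show pvBuildStack A 0 = [] from rfl, hr, hl] at h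
  exact h

-- phase-2 helpers
theorem length_pvAccumA (xs : List Int) (s : Int) : (pvAccumA xs s).length = xs.length := by
  induction xs generalizing s with
  | nil => simp [pvAccumA]
  | cons x xs ih => simp [pvAccumA, ih]

theorem pvPrefixB_eq (xs : List Int) (s : Int) : pvPrefixB xs s = pvAccumA xs s := by
  induction xs generalizing s with
  | nil => simp [pvPrefixB, pvAccumA]
  | cons x xs ih => simp [pvPrefixB, pvAccumA, ih]

theorem acc_getD (S : List Int) (c : Int) (k : Nat) (hk : k ≤ S.length) :
    (c :: pvAccumA S c).getD k 0 = c + (S.take k).sum := by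
  induction S generalizing c k with
  | nil =>
    have : k = 0 := by simpa using hk
    subst this
    simp [pvAccumA]
  | cons x xs ih =>
    cases k with
    | zero => simp
    | succ k =>
      have h1 : ((c : Int) :: pvAccumA (x :: xs) c).getD (k + 1) 0
          = ((c + x) :: pvAccumA xs (c + x)).getD k 0 := by
        simp [pvAccumA, List.getD]
      rw [h1, ih (c + x) k (by simpa using hk)]
      simp [List.take_succ_cons]
      ring

theorem sum_take_sub (S : List Int) (m i : Nat) (h : m ≤ i) :
    ((S.drop m).take (i - m)).sum = (S.take i).sum - (S.take m).sum := by
  conv_rhs => rw [show i = m + (i - m) by omega, List.take_add]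
  rw [List.sum_append]
  ring

-- ===== VERDICT (by name: the statement is the Claim_ definition above) =====
theorem getD_right_final (A : List Int) (x : Nat) (hxn : x < A.length) :
    (pvRightAt A A.length A.length).getD x 0
      = ((pvNextSmallEq A A.length (A.getD x 0) (x + 1) : Nat) : Int) := by
  have hle : pvNextSmallEq A A.length (A.getD x 0) (x + 1) ≤ A.length :=
    ns_le A A.length _ (x + 1) (by omega)
  have hle' : pvNextSmallEq A A.length (A[x]?.getD 0) (x + 1) ≤ A.length := hle
  by_cases h : pvNextSmallEq A A.length (A[x]?.getD 0) (x + 1) < A.length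
  · simp [pvRightAt, List.getD, List.getElem?_map, List.getElem?_range hxn, pvNsp]
    omega
  · simp [pvRightAt, List.getD, List.getElem?_map, List.getElem?_range hxn, pvNsp]
    omega

theorem getD_left_final (A : List Int) (x : Nat) (hxn : x < A.length) :
    (pvLeftAt A A.length A.length).getD x 0
      = pvPrevSmaller A (A.getD x 0) ((x : Int) - 1) := by
  simp [pvLeftAt, List.getD, List.getElem?_range hxn, hxn, pvPsp]

theorem totalStrength_2_spec : Claim_equal_totalStrength_2 := by
  intro A _
  show totalStrength_2 A = totalStrength_2_alt A
  simp only [totalStrength_2, totalStrength_2_alt, stack_result A A.length, pvPrefixB_eq A 0]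
  congr 1
  apply PySem.List.foldl_congr_mem
  intro acc x hx
  have hxn : x < A.length := List.mem_range.mp hx
  rw [getD_right_final A x hxn, getD_left_final A x hxn]
  have hSlen : (pvAccumA A 0).length = A.length := length_pvAccumA A 0
  have hpsle : pvPrevSmaller A (A.getD x 0) ((x : Int) - 1) ≤ (x : Int) - 1 :=
    ps_le A (A.getD x 0) ((x : Int) - 1)
  have hnsge : x + 1 ≤ pvNextSmallEq A A.length (A.getD x 0) (x + 1) :=
    ns_ge A A.length (A.getD x 0) (x + 1)
  have hnsle : pvNextSmallEq A A.length (A.getD x 0) (x + 1) ≤ A.length :=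
    ns_le A A.length (A.getD x 0) (x + 1) (by omega)
  have hm : (max (pvPrevSmaller A (A.getD x 0) ((x : Int) - 1)) 0).toNat ≤ x := by omega
  rw [show ((pvNextSmallEq A A.length (A.getD x 0) (x + 1) : Nat) : Int).toNat
      = pvNextSmallEq A A.length (A.getD x 0) (x + 1) from Int.toNat_natCast _]
  rw [acc_getD (pvAccumA A 0) 0 x (by omega),
    acc_getD (pvAccumA A 0) 0 (max (pvPrevSmaller A (A.getD x 0) ((x : Int) - 1)) 0).toNat
      (by omega),
    acc_getD (pvAccumA A 0) 0 (pvNextSmallEq A A.length (A.getD x 0) (x + 1)) (by omega)]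
  rw [PySem.List.slice_toNat (pvAccumA A 0)
        (a := max (pvPrevSmaller A (A.getD x 0) ((x : Int) - 1)) 0) (by omega) (by omega),
    PySem.List.slice_toNat (pvAccumA A 0) (a := ((x : Nat) : Int)) (by omega) (by omega)]
  simp only [Int.toNat_natCast]
  rw [sum_take_sub (pvAccumA A 0) (max (pvPrevSmaller A (A.getD x 0) ((x : Int) - 1)) 0).toNat x
      hm,
    sum_take_sub (pvAccumA A 0) x (pvNextSmallEq A A.length (A.getD x 0) (x + 1)) (by omega)]
  ring_nf
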